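-- pv_equiv track=rewrite | github.com/Nash115/french-code_compiler | frontend/scanner.py | is_a_known_keyword
-- ===== SOURCE A (Python) =====
-- keywords = {
--     "assignation": ["="],
--     "parenthesis_open": ["("],
--     "parenthesis_close": [")"],
--     "binary_operator": ["+", "-", "*", "/", "%"],
--
--     "bool": ["vrai", "faux"],
--     "end_of_instruction": [";"],
--     "print": ["afficher"],
--
--     "EOF": []
-- }
--
-- def is_a_known_keyword(line:str, index:int) -> bool:
--     if index >= len(line):
--         return True
--     if line[index] in [' ', '\n', '\t']:
--         return True
--     for keyword,symbols in keywords.items():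
--         for symbol in symbols:
--             if line[index:index+len(symbol)] == symbol:
--                 return True
--     return False
-- ===== SOURCE B (Python) =====
-- keywords = {
--     "assignation": ["="],
--     "parenthesis_open": ["("],
--     "parenthesis_close": [")"],
--     "binary_operator": ["+", "-", "*", "/", "%"],
--
--     "bool": ["vrai", "faux"],
--     "end_of_instruction": [";"],
--     "print": ["afficher"],
--
--     "EOF": []
-- }
--
-- # first-character dispatch: the single-character symbols, and each word symbol
-- # keyed by its first character (no two word symbols share a first character)
-- _SINGLES = "=()+-*/%;"
-- _WORDS = {'v': "vrai", 'f': "faux", 'a': "afficher"}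
--
-- def is_a_known_keyword(line: str, index: int) -> bool:
--     if index >= len(line):
--         return True
--     c = line[index]
--     if c in [' ', '\n', '\t']:
--         return True
--     if c in _SINGLES:
--         return True
--     w = _WORDS.get(c)
--     return w is not None and line.startswith(w, index)
-- ===== Notes on version B (the rewrite author's own statement) =====
-- stated objective: alternative
-- what changed: The scan over every keyword category and symbol is replaced by a first-character dispatch: one membership test in the single-character symbols, then at most one targeted startswith check for the unique word symbol beginning with that character; no loop over the keywords table remains at call time.
-- intended difference: For negative indices where the addressed position starts a keyword symbol that reaches the end of the string (index=-1 on a single-char symbol, index=-4 ending in 'vrai'/'faux', index=-8 ending in 'afficher'), A returns False because its slice line[index:index+len(symbol)] silently becomes empty once the stop bound crosses zero, while B returns True; B's value is intended since the character(s) at that position do match a known symbol. — e.g. on is_a_known_keyword("=", -1): A returns false, B returns true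
-- outside the precondition, e.g. on is_a_known_keyword('abc', -5): A raises IndexError, B raises IndexError
import Mathlib
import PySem

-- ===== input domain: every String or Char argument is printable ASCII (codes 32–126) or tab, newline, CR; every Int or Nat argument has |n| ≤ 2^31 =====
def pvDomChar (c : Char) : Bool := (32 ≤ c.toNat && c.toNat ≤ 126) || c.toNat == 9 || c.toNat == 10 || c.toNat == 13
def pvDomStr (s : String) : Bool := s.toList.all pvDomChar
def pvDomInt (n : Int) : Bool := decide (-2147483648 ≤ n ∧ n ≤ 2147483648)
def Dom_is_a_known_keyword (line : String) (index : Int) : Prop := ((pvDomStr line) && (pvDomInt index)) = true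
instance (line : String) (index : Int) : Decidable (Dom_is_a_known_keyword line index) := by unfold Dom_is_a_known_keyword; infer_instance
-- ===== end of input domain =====

-- B replaces the scan over the whole keyword table by a first-character dispatch
-- (singles membership + at most one targeted startswith); objective: alternative.

-- ===== PORT A =====
-- the module-level `keywords` dict (insertion order)
def kwTable : List (String × List String) :=
  [("assignation", ["="]),
   ("parenthesis_open", ["("]),
   ("parenthesis_close", [")"]),
   ("binary_operator", ["+", "-", "*", "/", "%"]),
   ("bool", ["vrai", "faux"]),
   ("end_of_instruction", [";"]),
   ("print", ["afficher"]),
   ("EOF", [])]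

def is_a_known_keyword (line : String) (index : Int) : Bool :=
  if index ≥ PySem.Str.len line then true
  else
    match PySem.Str.pyGet? line index with
    | none => false   -- Python raises IndexError here; excluded by Pre_
    | some c =>
      if [' ', '\n', '\t'].contains c then true
      else
        kwTable.any (fun kv =>
          kv.2.any (fun symbol =>
            PySem.Str.slice line (some index) (some (index + PySem.Str.len symbol)) == symbol))

-- ===== PORT B =====
-- module-level constants of Source B: the single-character symbols, and each word
-- symbol keyed by its first character
def kwSingles : String := "=()+-*/%;"
def kwWords : PySem.Dict Char String :=
  PySem.Dict.ofList [('v', "vrai"), ('f', "faux"), ('a', "afficher")]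

def is_a_known_keyword_alt (line : String) (index : Int) : Bool :=
  if index ≥ PySem.Str.len line then true
  else
    match PySem.Str.pyGet? line index with
    | none => false   -- Python raises IndexError here; excluded by Pre_
    | some c =>
      if [' ', '\n', '\t'].contains c then true
      else if PySem.Str.isIn (String.ofList [c]) kwSingles then true   -- `c in _SINGLES`
      else
        match PySem.Dict.get? kwWords c with
        | none => false
        | some w =>
          -- `line.startswith(w, index)`: Python reads the start as a slice bound,
          -- so this equals startswith on line[index:] — exact
          PySem.Chars.startswith (PySem.List.slice line.toList (some index) none) w.toList

-- ===== PRECONDITION & SPEC =====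
-- Pre_ excludes exactly the inputs where Python's `line[index]` raises IndexError
-- (index < -len(line)); both A and B raise there.
def Pre_is_a_known_keyword (line : String) (index : Int) : Prop :=
  -(PySem.Str.len line) ≤ index

instance (line : String) (index : Int) : Decidable (Pre_is_a_known_keyword line index) := by
  unfold Pre_is_a_known_keyword; infer_instance

def pvWitness_is_a_known_keyword : String × Int := ("a = b", 2)

-- For negative indices whose addressed position starts a keyword symbol reaching the
-- very end of the string (index = -len(s) and line ends with symbol s), A returns False
-- because its slice line[index:index+len(s)] becomes empty once the stop bound crosses
-- zero, while B returns True; B's value is intended since the characters there do match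
-- a known symbol.
-- the character codes of the line (61 '=', 40 '(', 41 ')', 43 '+', 45 '-', 42 '*',
-- 47 '/', 37 '%', 59 ';'; [118,114,97,105] "vrai", [102,97,117,120] "faux",
-- [97,102,102,105,99,104,101,114] "afficher")
def charCodes (line : String) := line.toList.map Char.toNat

def D_is_a_known_keyword (line : String) (index : Int) : Prop :=
  ∃ w ∈ ("=()+-*/%;".toList.map fun c => [c.toNat]) ++ ["vrai", "faux", "afficher"].map charCodes,
    index = -(w.length : Int) ∧ w <:+ charCodes line

instance (line : String) (index : Int) : Decidable (D_is_a_known_keyword line index) := by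
  unfold D_is_a_known_keyword; infer_instance

def Spec_is_a_known_keyword (line : String) (index : Int) (out : Bool) : Prop :=
  ¬ D_is_a_known_keyword line index → out = is_a_known_keyword_alt line index
instance (line : String) (index : Int) (out : Bool) : Decidable (Spec_is_a_known_keyword line index out) := by unfold Spec_is_a_known_keyword; infer_instance

def pvDiffWitness_is_a_known_keyword : String × Int := ("=", -1)
def pvDiffWitnessOut_is_a_known_keyword : Bool × Bool := (false, true)

-- ===== CLAIM (what is proved, stated in full; the proofs are below) =====
def Claim_unchanged_is_a_known_keyword : Prop := ∀ (line : String) (index : Int), Dom_is_a_known_keyword line index → Pre_is_a_known_keyword line index → Spec_is_a_known_keyword line index (is_a_known_keyword line index)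
def Claim_changed_is_a_known_keyword : Prop := Dom_is_a_known_keyword (pvDiffWitness_is_a_known_keyword.1) (pvDiffWitness_is_a_known_keyword.2) ∧ Pre_is_a_known_keyword (pvDiffWitness_is_a_known_keyword.1) (pvDiffWitness_is_a_known_keyword.2) ∧ D_is_a_known_keyword (pvDiffWitness_is_a_known_keyword.1) (pvDiffWitness_is_a_known_keyword.2) ∧ is_a_known_keyword (pvDiffWitness_is_a_known_keyword.1) (pvDiffWitness_is_a_known_keyword.2) = pvDiffWitnessOut_is_a_known_keyword.1 ∧ is_a_known_keyword_alt (pvDiffWitness_is_a_known_keyword.1) (pvDiffWitness_is_a_known_keyword.2) = pvDiffWitnessOut_is_a_known_keyword.2 ∧ pvDiffWitnessOut_is_a_known_keyword.1 ≠ pvDiffWitnessOut_is_a_known_keyword.2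
def Claim_exact_is_a_known_keyword : Prop := ∀ (line : String) (index : Int), Dom_is_a_known_keyword line index → Pre_is_a_known_keyword line index → D_is_a_known_keyword line index → is_a_known_keyword line index ≠ is_a_known_keyword_alt line index

-- ===== LEMMAS AND PROOFS =====

-- the twelve keyword symbols (proof-side index for the case analyses)
def kwSymbols : List String :=
  ["=", "(", ")", "+", "-", "*", "/", "%", ";", "vrai", "faux", "afficher"]

theorem end_of_suffix (line : String) (sym : String) (h : sym.toList <:+ line.toList) :
    PySem.Str.endswith line sym = true := by
  rw [show PySem.Str.endswith line sym = PySem.Chars.endswith line.toList sym.toList from by simp]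
  exact (PySem.Chars.endswith_iff _ _).mpr h

-- a suffix of the character codes is a suffix of the characters, and conversely
theorem suffix_code (sym : List Char) (cs : List Char) :
    (sym.map Char.toNat) <:+ (cs.map Char.toNat) ↔ sym <:+ cs := by
  constructor
  · intro h
    have hinj : Function.Injective Char.toNat :=
      StrictMono.injective fun _ _ h => h
    have hd := List.suffix_iff_eq_drop.mp h
    rw [List.length_map, List.length_map, ← List.map_drop] at hd
    rw [List.suffix_iff_eq_drop]
    exact List.map_injective_iff.mpr hinj hd
  · exact fun h => h.map Char.toNat

theorem code_suffix_of (line : String) (sym : String) (codes : List Nat)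
    (hc : sym.toList.map Char.toNat = codes) (h : sym.toList <:+ line.toList) :
    codes <:+ charCodes line := by
  rw [← hc]; exact (suffix_code _ _).mpr h

theorem suffix_of_code (line : String) (sym : String) (codes : List Nat)
    (hc : sym.toList.map Char.toNat = codes) (h : codes <:+ charCodes line) :
    sym.toList <:+ line.toList := by
  rw [← hc] at h; exact (suffix_code _ _).mp h

-- D_ holds exactly when some keyword symbol ends the line at position index = -len(s)
theorem D_of_sym (line : String) (index : Int) (sym : String) (hmem : sym ∈ kwSymbols)
    (hidx : index = -(PySem.Str.len sym)) (hend : PySem.Str.endswith line sym = true) :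
    D_is_a_known_keyword line index := by
  have hsuf : sym.toList <:+ line.toList := by
    rw [show PySem.Str.endswith line sym = PySem.Chars.endswith line.toList sym.toList from by simp] at hend
    exact (PySem.Chars.endswith_iff _ _).mp hend
  subst hidx
  unfold D_is_a_known_keyword
  simp only [kwSymbols, List.mem_cons, List.not_mem_nil, or_false] at hmem
  rcases hmem with rfl | rfl | rfl | rfl | rfl | rfl | rfl | rfl | rfl | rfl | rfl | rfl
  · exact ⟨[61], by decide, by decide, code_suffix_of line "=" _ (by decide) hsuf⟩
  · exact ⟨[40], by decide, by decide, code_suffix_of line "(" _ (by decide) hsuf⟩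
  · exact ⟨[41], by decide, by decide, code_suffix_of line ")" _ (by decide) hsuf⟩
  · exact ⟨[43], by decide, by decide, code_suffix_of line "+" _ (by decide) hsuf⟩
  · exact ⟨[45], by decide, by decide, code_suffix_of line "-" _ (by decide) hsuf⟩
  · exact ⟨[42], by decide, by decide, code_suffix_of line "*" _ (by decide) hsuf⟩
  · exact ⟨[47], by decide, by decide, code_suffix_of line "/" _ (by decide) hsuf⟩
  · exact ⟨[37], by decide, by decide, code_suffix_of line "%" _ (by decide) hsuf⟩
  · exact ⟨[59], by decide, by decide, code_suffix_of line ";" _ (by decide) hsuf⟩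
  · exact ⟨[118, 114, 97, 105], by decide, by decide, code_suffix_of line "vrai" _ (by decide) hsuf⟩
  · exact ⟨[102, 97, 117, 120], by decide, by decide, code_suffix_of line "faux" _ (by decide) hsuf⟩
  · exact ⟨[97, 102, 102, 105, 99, 104, 101, 114], by decide, by decide, code_suffix_of line "afficher" _ (by decide) hsuf⟩

theorem D_to_sym (line : String) (index : Int) (hD : D_is_a_known_keyword line index) :
    ∃ sym, sym ∈ kwSymbols ∧ index = -(PySem.Str.len sym) ∧
      PySem.Str.endswith line sym = true := by
  obtain ⟨w, hw, hidx, hsuf⟩ := hD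
  rw [show (("=()+-*/%;".toList.map fun c => [c.toNat]) ++ ["vrai", "faux", "afficher"].map charCodes)
        = [[61], [40], [41], [43], [45], [42], [47], [37], [59], [118, 114, 97, 105],
           [102, 97, 117, 120], [97, 102, 102, 105, 99, 104, 101, 114]] from by decide] at hw
  simp only [List.mem_cons, List.not_mem_nil, or_false] at hw
  rcases hw with rfl | rfl | rfl | rfl | rfl | rfl | rfl | rfl | rfl | rfl | rfl | rfl
  · exact ⟨"=", by decide, by rw [hidx]; decide, end_of_suffix line "=" (suffix_of_code line "=" _ (by decide) hsuf)⟩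
  · exact ⟨"(", by decide, by rw [hidx]; decide, end_of_suffix line "(" (suffix_of_code line "(" _ (by decide) hsuf)⟩
  · exact ⟨")", by decide, by rw [hidx]; decide, end_of_suffix line ")" (suffix_of_code line ")" _ (by decide) hsuf)⟩
  · exact ⟨"+", by decide, by rw [hidx]; decide, end_of_suffix line "+" (suffix_of_code line "+" _ (by decide) hsuf)⟩
  · exact ⟨"-", by decide, by rw [hidx]; decide, end_of_suffix line "-" (suffix_of_code line "-" _ (by decide) hsuf)⟩
  · exact ⟨"*", by decide, by rw [hidx]; decide, end_of_suffix line "*" (suffix_of_code line "*" _ (by decide) hsuf)⟩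
  · exact ⟨"/", by decide, by rw [hidx]; decide, end_of_suffix line "/" (suffix_of_code line "/" _ (by decide) hsuf)⟩
  · exact ⟨"%", by decide, by rw [hidx]; decide, end_of_suffix line "%" (suffix_of_code line "%" _ (by decide) hsuf)⟩
  · exact ⟨";", by decide, by rw [hidx]; decide, end_of_suffix line ";" (suffix_of_code line ";" _ (by decide) hsuf)⟩
  · exact ⟨"vrai", by decide, by rw [hidx]; decide, end_of_suffix line "vrai" (suffix_of_code line "vrai" _ (by decide) hsuf)⟩
  · exact ⟨"faux", by decide, by rw [hidx]; decide, end_of_suffix line "faux" (suffix_of_code line "faux" _ (by decide) hsuf)⟩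
  · exact ⟨"afficher", by decide, by rw [hidx]; decide, end_of_suffix line "afficher" (suffix_of_code line "afficher" _ (by decide) hsuf)⟩

-- String `==` is equality of the character lists
theorem strBeq_eq_decide (s t : String) : (s == t) = decide (s.toList = t.toList) := by
  rw [Bool.eq_iff_iff]
  simp [String.ext_iff]

-- A's slice comparison at a nonnegative index is a prefix test on the suffix
theorem symA_pos (line : String) (j : Nat) (sym : String) :
    (PySem.Str.slice line (some (j : Int)) (some ((j : Int) + PySem.Str.len sym)) == sym)
      = decide (sym.toList <+: line.toList.drop j) := by
  rw [strBeq_eq_decide, PySem.Str.len_eq]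
  simp [PySem.List.slice_natCast_add, List.prefix_iff_eq_take, eq_comm]

-- A's slice comparison at negative index -k, on the list side
theorem lsliceCmp_neg (cs : List Char) (k : Nat) (hk : 0 < k) (hkn : k ≤ cs.length)
    (sym : List Char) :
    decide (PySem.List.slice cs (some (-(k : Int))) (some (-(k : Int) + (sym.length : Int))) = sym)
      = decide (sym.length < k ∧ sym <+: cs.drop (cs.length - k)) := by
  by_cases h : sym.length < k
  · have hstop : (-(k:Int) + (sym.length:Int)) = -(((k - sym.length : Nat)) : Int) := by
      push_cast [h.le]; ring
    rw [hstop]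
    have hs : PySem.List.slice cs (some (-(k:Int))) (some (-((k - sym.length : Nat) : Int)))
        = (cs.drop (cs.length - k)).take sym.length := by
      simp [PySem.List.slice, PySem.List.clampIdx_neg_natCast _ _ hk,
            PySem.List.clampIdx_neg_natCast _ _ (show 0 < k - sym.length by omega)]
      omega
    rw [hs]
    simp [List.prefix_iff_eq_take, eq_comm, h]
  · have hstop : (-(k:Int) + (sym.length:Int)) = ((sym.length - k : Nat) : Int) := by
      push_cast [Nat.le_of_not_lt h]; ring
    have hlen : (PySem.List.slice cs (some (-(k:Int))) (some (-(k:Int) + (sym.length:Int)))).length < sym.length := by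
      rw [hstop, PySem.List.length_slice]
      simp [PySem.List.clampIdx_neg_natCast _ _ hk]
      omega
    have hne : PySem.List.slice cs (some (-(k:Int))) (some (-(k:Int) + (sym.length:Int))) ≠ sym := by
      intro he; rw [he] at hlen; omega
    simp [hne, h]

-- A's slice comparison at index -k is a prefix test restricted to symbols shorter than k
theorem symA_neg (line : String) (k : Nat) (hk : 0 < k) (hkn : k ≤ line.toList.length)
    (sym : String) :
    (PySem.Str.slice line (some (-(k : Int))) (some (-(k : Int) + PySem.Str.len sym)) == sym)
      = decide (sym.toList.length < k ∧
                sym.toList <+: line.toList.drop (line.toList.length - k)) := by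
  rw [strBeq_eq_decide, PySem.Str.len_eq]
  have hb : (PySem.Str.slice line (some (-(k : Int))) (some (-(k : Int) + (sym.toList.length : Int)))).toList
      = PySem.List.slice line.toList (some (-(k : Int))) (some (-(k : Int) + (sym.toList.length : Int))) := by
    simp
  rw [hb]
  exact lsliceCmp_neg line.toList k hk hkn sym.toList

-- B's dispatch on the first character equals A's table scan phrased as prefix tests
set_option maxHeartbeats 1000000 in
set_option maxRecDepth 4096 in
theorem B_dispatch (c : Char) (r : List Char) :
    (if PySem.Str.isIn (String.ofList [c]) kwSingles then true
     else
       match PySem.Dict.get? kwWords c with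
       | none => false
       | some w => PySem.Chars.startswith (c :: r) w.toList)
      = kwTable.any (fun kv => kv.2.any (fun sym => decide (sym.toList <+: (c :: r)))) := by
  have hin : PySem.Str.isIn (String.ofList [c]) kwSingles
      = (['=','(',')','+','-','*','/','%',';'].contains c) := by
    rw [Bool.eq_iff_iff, PySem.Str.isIn_iff_infix]
    simp [kwSingles, List.singleton_infix_iff]
  have hmk : kwWords = PySem.Dict.mk [('v', "vrai"), ('f', "faux"), ('a', "afficher")] := by decide
  have hget : PySem.Dict.get? kwWords c
      = (if c = 'v' then some "vrai" else if c = 'f' then some "faux"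
         else if c = 'a' then some "afficher" else none) := by
    by_cases h1 : c = 'v'
    · subst h1; decide
    by_cases h2 : c = 'f'
    · subst h2; decide
    by_cases h3 : c = 'a'
    · subst h3; decide
    · rw [hmk]
      simp [PySem.Dict.get?, beq_iff_eq,
            Ne.symm h1, Ne.symm h2, Ne.symm h3, h1, h2, h3]
  rw [hin, hget]
  simp only [kwTable, List.any_cons, List.any_nil]
  rw [Bool.eq_iff_iff]
  by_cases hv : c = 'v'
  · subst hv
    simp [PySem.Chars.startswith_iff, List.cons_prefix_cons,
      show ("vrai").toList = ['v','r','a','i'] from rfl,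
      show ("faux").toList = ['f','a','u','x'] from rfl,
      show ("afficher").toList = ['a','f','f','i','c','h','e','r'] from rfl]
  by_cases hf : c = 'f'
  · subst hf
    simp [PySem.Chars.startswith_iff, List.cons_prefix_cons,
      show ("vrai").toList = ['v','r','a','i'] from rfl,
      show ("faux").toList = ['f','a','u','x'] from rfl,
      show ("afficher").toList = ['a','f','f','i','c','h','e','r'] from rfl]
  by_cases ha : c = 'a'
  · subst ha
    simp [PySem.Chars.startswith_iff, List.cons_prefix_cons,
      show ("vrai").toList = ['v','r','a','i'] from rfl,
      show ("faux").toList = ['f','a','u','x'] from rfl,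
      show ("afficher").toList = ['a','f','f','i','c','h','e','r'] from rfl]
  · simp only [if_neg hv, if_neg hf, if_neg ha]
    by_cases hc9 : c ∈ ['=','(',')','+','-','*','/','%',';']
    · have hcont : (['=','(',')','+','-','*','/','%',';'].contains c) = true := by
        simpa using hc9
      rw [hcont]
      simp only [List.mem_cons, List.not_mem_nil, or_false] at hc9
      rcases hc9 with rfl | rfl | rfl | rfl | rfl | rfl | rfl | rfl | rfl <;> simp
    · have hcont : (['=','(',')','+','-','*','/','%',';'].contains c) = false := by
        simpa using hc9
      rw [hcont]
      simp only [List.mem_cons, List.not_mem_nil, or_false, not_or] at hc9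
      obtain ⟨n1, n2, n3, n4, n5, n6, n7, n8, n9⟩ := hc9
      simp [List.cons_prefix_cons,
        show ("vrai").toList = ['v','r','a','i'] from rfl,
        show ("faux").toList = ['f','a','u','x'] from rfl,
        show ("afficher").toList = ['a','f','f','i','c','h','e','r'] from rfl,
        show ("=").toList = ['='] from rfl, show ("(").toList = ['('] from rfl,
        show (")").toList = [')'] from rfl, show ("+").toList = ['+'] from rfl,
        show ("-").toList = ['-'] from rfl, show ("*").toList = ['*'] from rfl,
        show ("/").toList = ['/'] from rfl, show ("%").toList = ['%'] from rfl,
        show (";").toList = [';'] from rfl,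
        Ne.symm hv, Ne.symm hf, Ne.symm ha,
        Ne.symm n1, Ne.symm n2, Ne.symm n3, Ne.symm n4, Ne.symm n5,
        Ne.symm n6, Ne.symm n7, Ne.symm n8, Ne.symm n9]

-- line[-k] for 0 < k ≤ len(line)
theorem pyGet_neg (line : String) (k : Nat) (hk0 : 0 < k) (hkn : k ≤ line.toList.length)
    (hidx : line.toList.length - k < line.toList.length) :
    PySem.Str.pyGet? line (-(k : Int)) = some (line.toList[line.toList.length - k]'hidx) := by
  have e : line.length = line.toList.length := by simp
  simp [PySem.List.pyGet?, PySem.List.pyIdx?, hk0.ne']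
  rw [if_pos (by omega : k ≤ line.length)]
  simp [List.getElem?_eq_getElem (show line.length - k < line.toList.length from by omega)]

-- outside D_, the length restriction in symA_neg is vacuous
theorem sym_collapse (line : String) (k : Nat) (hk : 0 < k) (hkn : k ≤ line.toList.length)
    (sym : String) (hmem : sym ∈ kwSymbols)
    (hD : ¬ D_is_a_known_keyword line (-(k : Int))) :
    decide (sym.toList.length < k ∧ sym.toList <+: line.toList.drop (line.toList.length - k))
      = decide (sym.toList <+: line.toList.drop (line.toList.length - k)) := by
  by_cases hp : sym.toList <+: line.toList.drop (line.toList.length - k)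
  · by_cases hl : sym.toList.length < k
    · rw [decide_eq_true (show _ ∧ _ from ⟨hl, hp⟩), decide_eq_true hp]
    · exfalso
      have hlen : (line.toList.drop (line.toList.length - k)).length = k := by
        rw [List.length_drop]; omega
      have hle : sym.toList.length ≤ k := by
        have := hp.length_le; omega
      have heq : sym.toList = line.toList.drop (line.toList.length - k) := by
        have := List.prefix_iff_eq_take.mp hp
        rw [this, List.take_of_length_le (by omega)]
      apply hD
      refine D_of_sym line _ sym hmem ?_ ?_
      · rw [PySem.Str.len_eq]
        omega
      · rw [show PySem.Str.endswith line sym = PySem.Chars.endswith line.toList sym.toList from by simp]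
        rw [PySem.Chars.endswith_iff, List.suffix_iff_eq_drop, heq]
        congr 1
        omega
  · rw [decide_eq_false hp, decide_eq_false (show ¬ _ from fun h => hp h.2)]

-- the whole equivalence, outside D_
theorem AB_eq_outside (line : String) (index : Int)
    (hpre : Pre_is_a_known_keyword line index)
    (hD : ¬ D_is_a_known_keyword line index) :
    is_a_known_keyword line index = is_a_known_keyword_alt line index := by
  unfold Pre_is_a_known_keyword at hpre
  unfold is_a_known_keyword is_a_known_keyword_alt
  by_cases hge : index ≥ PySem.Str.len line
  · rw [if_pos hge, if_pos hge]
  · rw [if_neg hge, if_neg hge]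
    rw [PySem.Str.len_eq] at hge hpre
    by_cases hneg : 0 ≤ index
    · -- nonnegative index
      obtain ⟨j, rfl⟩ : ∃ j : Nat, index = (j : Int) :=
        ⟨index.toNat, (Int.toNat_of_nonneg hneg).symm⟩
      have hj : j < line.toList.length := by exact_mod_cast not_le.mp hge
      have hget : PySem.Str.pyGet? line ((j : Nat) : Int) = some (line.toList[j]) := by
        simp [List.getElem?_eq_getElem hj]
      simp only [hget]
      by_cases hw : [' ', '\n', '\t'].contains (line.toList[j])
      · rw [if_pos hw, if_pos hw]
      · rw [if_neg hw, if_neg hw]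
        rw [show PySem.List.slice line.toList (some ((j : Nat) : Int)) none
              = line.toList.drop j from PySem.List.slice_from_natCast line.toList j]
        simp only [symA_pos]
        rw [List.drop_eq_getElem_cons hj]
        exact (B_dispatch (line.toList[j]) (line.toList.drop (j + 1))).symm
    · -- negative index
      obtain ⟨k, hk0, rfl⟩ : ∃ k : Nat, 0 < k ∧ index = -(k : Int) :=
        ⟨(-index).toNat, by omega, by omega⟩
      have hkn : k ≤ line.toList.length := by omega
      have hidx : line.toList.length - k < line.toList.length := by omega
      have hget := pyGet_neg line k hk0 hkn hidx
      simp only [hget]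
      by_cases hw : [' ', '\n', '\t'].contains (line.toList[line.toList.length - k]'hidx)
      · rw [if_pos hw, if_pos hw]
      · rw [if_neg hw, if_neg hw]
        rw [PySem.List.slice_from_neg_natCast line.toList k hk0]
        simp only [symA_neg line k hk0 hkn]
        simp only [kwTable, List.any_cons, List.any_nil]
        rw [sym_collapse line k hk0 hkn "=" (by decide) hD,
            sym_collapse line k hk0 hkn "(" (by decide) hD,
            sym_collapse line k hk0 hkn ")" (by decide) hD,
            sym_collapse line k hk0 hkn "+" (by decide) hD,
            sym_collapse line k hk0 hkn "-" (by decide) hD,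
            sym_collapse line k hk0 hkn "*" (by decide) hD,
            sym_collapse line k hk0 hkn "/" (by decide) hD,
            sym_collapse line k hk0 hkn "%" (by decide) hD,
            sym_collapse line k hk0 hkn ";" (by decide) hD,
            sym_collapse line k hk0 hkn "vrai" (by decide) hD,
            sym_collapse line k hk0 hkn "faux" (by decide) hD,
            sym_collapse line k hk0 hkn "afficher" (by decide) hD]
        rw [List.drop_eq_getElem_cons hidx]
        rw [B_dispatch (line.toList[line.toList.length - k]'hidx)
              (line.toList.drop (line.toList.length - k + 1))]
        simp only [kwTable, List.any_cons, List.any_nil]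

-- inside D_: A's slice for the matching symbol is empty/truncated (False) while
-- B sees the symbol at the addressed position (True)
theorem exact_of_suffix (line : String) (s : String)
    (hpos : 0 < s.toList.length)
    (hsuf : s.toList <:+ line.toList)
    (hws : ([' ', '\n', '\t'].contains (s.toList.headD ' ')) = false)
    (hAfalse : (kwTable.any (fun kv => kv.2.any (fun sym =>
        decide (sym.toList.length < s.toList.length ∧ sym.toList <+: s.toList)))) = false)
    (hBtrue : (if PySem.Str.isIn (String.ofList [s.toList.headD ' ']) kwSingles then true
               else match PySem.Dict.get? kwWords (s.toList.headD ' ') with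
                    | none => false
                    | some w => PySem.Chars.startswith s.toList w.toList) = true) :
    is_a_known_keyword line (-(s.toList.length : Int))
      ≠ is_a_known_keyword_alt line (-(s.toList.length : Int)) := by
  have hkn : s.toList.length ≤ line.toList.length := hsuf.length_le
  have heq : s.toList = line.toList.drop (line.toList.length - s.toList.length) := by
    simpa using List.suffix_iff_eq_drop.mp hsuf
  have hidx : line.toList.length - s.toList.length < line.toList.length := by omega
  have hc : line.toList[line.toList.length - s.toList.length]'hidx = s.toList.headD ' ' := by
    conv_rhs => rw [heq, List.drop_eq_getElem_cons hidx]
    rfl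
  unfold is_a_known_keyword is_a_known_keyword_alt
  rw [if_neg (by rw [PySem.Str.len_eq]; omega), if_neg (by rw [PySem.Str.len_eq]; omega)]
  simp only [pyGet_neg line s.toList.length hpos hkn hidx]
  rw [hc]
  rw [if_neg (by rw [hws]; exact Bool.false_ne_true), if_neg (by rw [hws]; exact Bool.false_ne_true)]
  simp only [symA_neg line s.toList.length hpos hkn]
  rw [PySem.List.slice_from_neg_natCast line.toList s.toList.length hpos]
  rw [← heq]
  rw [hAfalse, hBtrue]
  exact Bool.false_ne_true

-- ===== VERDICT (by name: the statement is the Claim_ definition above) =====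
theorem is_a_known_keyword_spec : Claim_unchanged_is_a_known_keyword := by
  intro line index _ hpre hD
  exact AB_eq_outside line index hpre hD

set_option maxRecDepth 8192 in
theorem is_a_known_keyword_changed : Claim_changed_is_a_known_keyword := by
  unfold Claim_changed_is_a_known_keyword; decide

theorem is_a_known_keyword_tight : Claim_exact_is_a_known_keyword := by
  intro line index _ _ hD
  obtain ⟨s, hmem, hidx, hend⟩ := D_to_sym line index hD
  rw [PySem.Str.len_eq] at hidx
  have hsuf : s.toList <:+ line.toList := by
    rw [show PySem.Str.endswith line s = PySem.Chars.endswith line.toList s.toList from by simp] at hend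
    exact (PySem.Chars.endswith_iff _ _).mp hend
  subst hidx
  simp only [kwSymbols, List.mem_cons, List.not_mem_nil, or_false] at hmem
  rcases hmem with rfl | rfl | rfl | rfl | rfl | rfl | rfl | rfl | rfl | rfl | rfl | rfl <;>
    exact exact_of_suffix line _ (by decide) hsuf (by decide) (by decide) (by decide)
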